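-- pv_equiv track=rewrite | github.com/Xytricit/lupi-fy.com | recommend/utils.py | _apply_diversity_rules
-- ===== SOURCE A (Python) =====
-- def _apply_diversity_rules(scored_candidates, limit):
--     """Apply anti-fatigue and diversity rules."""
--     result = []
--     creator_counts = {}
--
--     for candidate, score in scored_candidates:
--         if len(result) >= limit:
--             break
--
--         # Skip if creator has appeared 3x already
--         creator_id = candidate.get('creator_id')
--         if creator_id:
--             count = creator_counts.get(creator_id, 0)
--             if count >= 3:
--                 continue
--             creator_counts[creator_id] = count + 1
--
--         result.append(candidate)
--
--     return result
-- ===== SOURCE B (Python) =====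
-- def _apply_diversity_rules(scored_candidates, limit):
--     """Apply anti-fatigue and diversity rules.
--
--     Different decomposition: filter ALL candidates with a stateful per-creator
--     predicate (cap of 3 per truthy creator_id; falsy creator_ids always pass
--     and are never counted), then take the limit with one final slice instead
--     of an early-exit break.
--     """
--     counts = {}
--
--     def _keep(candidate):
--         creator_id = candidate.get('creator_id')
--         if not creator_id:
--             return True
--         n = counts.get(creator_id, 0)
--         if n >= 3:
--             return False
--         counts[creator_id] = n + 1
--         return True
--
--     filtered = [candidate for candidate, _score in scored_candidates if _keep(candidate)]
--     return filtered[:max(limit, 0)]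
-- ===== Notes on version B (the rewrite author's own statement) =====
-- stated objective: alternative
-- what changed: B replaces A's early-exit break-on-limit loop by a stateful-predicate comprehension that diversity-filters ALL candidates, then applies the limit with one final slice filtered[:max(limit, 0)].
import Mathlib
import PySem

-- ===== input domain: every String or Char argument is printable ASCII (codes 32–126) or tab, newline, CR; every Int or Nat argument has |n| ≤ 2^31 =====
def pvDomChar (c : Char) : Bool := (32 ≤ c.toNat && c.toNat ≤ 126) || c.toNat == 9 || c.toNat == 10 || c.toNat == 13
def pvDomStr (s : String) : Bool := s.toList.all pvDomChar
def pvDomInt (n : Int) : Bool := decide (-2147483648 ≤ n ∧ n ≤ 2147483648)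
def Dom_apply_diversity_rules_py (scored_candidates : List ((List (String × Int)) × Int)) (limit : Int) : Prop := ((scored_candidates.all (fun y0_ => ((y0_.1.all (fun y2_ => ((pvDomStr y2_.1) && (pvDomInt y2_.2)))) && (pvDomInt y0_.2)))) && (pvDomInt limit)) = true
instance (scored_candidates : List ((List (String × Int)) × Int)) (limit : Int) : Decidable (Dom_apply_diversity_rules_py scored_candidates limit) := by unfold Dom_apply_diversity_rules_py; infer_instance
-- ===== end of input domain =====

-- B replaces A's break-on-limit loop by filtering ALL candidates and then taking one final
-- slice filtered[:max(limit, 0)] — a different decomposition (objective: alternative, same value).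

-- ===== PORT A =====
-- A's loop: break when len(result) >= limit, skip creators already counted 3 times
-- (falsy creator_id is appended without counting).
def pvALoop (limit : Int) : List ((List (String × Int)) × Int) → List (List (String × Int)) → PySem.Dict Int Int → List (List (String × Int))
  | [], res, _ => res
  | (cand, _score) :: rest, res, counts =>
    if PySem.List.len res ≥ limit then res
    else
      match PySem.Dict.get? (PySem.Dict.mk cand) "creator_id" with
      | some cid =>
        if cid ≠ 0 then
          let count := counts.getD cid 0
          if count ≥ 3 then pvALoop limit rest res counts
          else pvALoop limit rest (res ++ [cand]) (counts.insert cid (count + 1))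
        else pvALoop limit rest (res ++ [cand]) counts
      | none => pvALoop limit rest (res ++ [cand]) counts

def apply_diversity_rules_py (scored_candidates : List ((List (String × Int)) × Int)) (limit : Int) : List (List (String × Int)) :=
  pvALoop limit scored_candidates [] PySem.Dict.empty

-- ===== PORT B =====
-- B's stateful predicate _keep: (keep-this-candidate?, updated counts).
def pvKeep (counts : PySem.Dict Int Int) (candidate : List (String × Int)) : Bool × PySem.Dict Int Int :=
  match PySem.Dict.get? (PySem.Dict.mk candidate) "creator_id" with
  | none => (true, counts)
  | some cid =>
    if cid = 0 then (true, counts)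
    else
      let n := counts.getD cid 0
      if n ≥ 3 then (false, counts)
      else (true, counts.insert cid (n + 1))

-- The filtering comprehension, threading counts left to right.
def pvFilter (counts : PySem.Dict Int Int) : List ((List (String × Int)) × Int) → List (List (String × Int))
  | [] => []
  | (cand, _score) :: rest =>
    let kc := pvKeep counts cand
    if kc.1 then cand :: pvFilter kc.2 rest else pvFilter kc.2 rest

def apply_diversity_rules_py_alt (scored_candidates : List ((List (String × Int)) × Int)) (limit : Int) : List (List (String × Int)) :=
  (pvFilter PySem.Dict.empty scored_candidates).take (max limit 0).toNat

-- ===== PRECONDITION & SPEC =====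
def Spec_apply_diversity_rules_py (scored_candidates : List ((List (String × Int)) × Int)) (limit : Int) (out : List (List (String × Int))) : Prop := out = apply_diversity_rules_py_alt scored_candidates limit
instance (scored_candidates : List ((List (String × Int)) × Int)) (limit : Int) (out : List (List (String × Int))) : Decidable (Spec_apply_diversity_rules_py scored_candidates limit out) := by unfold Spec_apply_diversity_rules_py; infer_instance

-- ===== CLAIM (what is proved, stated in full; the proofs are below) =====
def Claim_equal_apply_diversity_rules_py : Prop := ∀ (scored_candidates : List ((List (String × Int)) × Int)) (limit : Int), Dom_apply_diversity_rules_py scored_candidates limit → Spec_apply_diversity_rules_py scored_candidates limit (apply_diversity_rules_py scored_candidates limit)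

-- ===== LEMMAS AND PROOFS =====

-- A's break-at-limit loop is prefix-taking from B's full filtered list.
theorem pvALoop_eq_filter_take (limit : Int) (l : List ((List (String × Int)) × Int)) :
    ∀ (res : List (List (String × Int))) (counts : PySem.Dict Int Int),
      pvALoop limit l res counts = res ++ (pvFilter counts l).take (limit - res.length).toNat := by
  induction l with
  | nil => intro res counts; simp [pvALoop, pvFilter]
  | cons hd tl ih =>
    intro res counts
    obtain ⟨cand, score⟩ := hd
    by_cases hlim : PySem.List.len res ≥ limit
    · have h0 : (limit - (res.length : Int)).toNat = 0 := by
        simp [PySem.List.len_eq] at hlim; omega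
      simp only [pvALoop]
      rw [if_pos hlim, h0]
      simp
    · have hlt : (res.length : Int) < limit := by
        simp [PySem.List.len_eq] at hlim; omega
      have htake : ∀ (x : List (String × Int)) (xs : List (List (String × Int))),
          (x :: xs).take (limit - (res.length : Int)).toNat
            = x :: xs.take (limit - ((res.length : Int) + 1)).toNat := by
        intro x xs
        have : (limit - (res.length : Int)).toNat
            = (limit - ((res.length : Int) + 1)).toNat + 1 := by omega
        simp [this]
      simp only [pvALoop, hlim, if_false, pvFilter]
      cases hg : PySem.Dict.get? (PySem.Dict.mk cand) "creator_id" with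
      | none =>
        rw [ih (res ++ [cand]) counts]
        simp only [pvKeep, hg, if_pos]
        rw [htake]
        have hlen : (((res ++ [cand]).length : ℕ) : ℤ) = (res.length : ℤ) + 1 := by
          simp
        rw [hlen]
        simp
      | some cid =>
        by_cases hz : cid = 0
        · subst hz
          simp only [ne_eq, not_true_eq_false, if_false]
          rw [ih (res ++ [cand]) counts]
          simp only [pvKeep, hg, if_pos]
          rw [htake]
          have hlen : (((res ++ [cand]).length : ℕ) : ℤ) = (res.length : ℤ) + 1 := by
            simp
          rw [hlen]
          simp
        · by_cases hc : counts.getD cid 0 ≥ 3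
          · simp only [ne_eq, hz, not_false_eq_true, if_true]
            rw [if_pos hc, ih res counts]
            simp [pvKeep, hg, hz, hc]
          · simp only [ne_eq, hz, not_false_eq_true, if_true]
            rw [if_neg hc, ih (res ++ [cand]) (counts.insert cid (counts.getD cid 0 + 1))]
            simp only [pvKeep, hg, hz, hc, if_false, if_true]
            rw [htake]
            have hlen : (((res ++ [cand]).length : ℕ) : ℤ) = (res.length : ℤ) + 1 := by
              simp
            rw [hlen]
            simp

-- ===== VERDICT (by name: the statement is the Claim_ definition above) =====
theorem apply_diversity_rules_py_spec : Claim_equal_apply_diversity_rules_py := by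
  intro sc limit _
  unfold Spec_apply_diversity_rules_py apply_diversity_rules_py apply_diversity_rules_py_alt
  rw [pvALoop_eq_filter_take]
  simp only [List.nil_append, List.length_nil, Nat.cast_zero, Int.sub_zero]
  congr 1
  omega
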